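-- pv_equiv track=rewrite | github.com/m1sterzer0/DaveProgrammingCompetitions | hackercup/2020/qual_D2.py | getGasOptions
-- ===== SOURCE A (Python) =====
-- def getGasOptions(gr,x,C,exclude1,exclude2) :
--     st = [(x,-1,0)]
--     ans = []
--     while st :
--         (n,p,lev) = st.pop()
--         if C[n] > 0 : ans.append((lev,C[n]))
--         for c in gr[n] :
--             if c == p or c == exclude1 or c == exclude2 : continue
--             st.append((c,n,lev+1))
--     return ans
-- ===== SOURCE B (Python) =====
-- def getGasOptions(gr, x, C, exclude1, exclude2):
--     def dfs(n, p, lev):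
--         v = C[n]
--         here = [(lev, v)] if v > 0 else []
--         return here + [t for c in reversed(gr[n])
--                        if c != p and c != exclude1 and c != exclude2
--                        for t in dfs(c, n, lev + 1)]
--     return dfs(x, -1, 0)
-- ===== Notes on version B (the rewrite author's own statement) =====
-- stated objective: alternative
-- what changed: Replaced the explicit-stack while-loop that threads a mutable answer list with a recursive DFS that builds the result compositionally by list concatenation (visiting children in reversed order to keep the stack's LIFO visit order).
import Mathlib
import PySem

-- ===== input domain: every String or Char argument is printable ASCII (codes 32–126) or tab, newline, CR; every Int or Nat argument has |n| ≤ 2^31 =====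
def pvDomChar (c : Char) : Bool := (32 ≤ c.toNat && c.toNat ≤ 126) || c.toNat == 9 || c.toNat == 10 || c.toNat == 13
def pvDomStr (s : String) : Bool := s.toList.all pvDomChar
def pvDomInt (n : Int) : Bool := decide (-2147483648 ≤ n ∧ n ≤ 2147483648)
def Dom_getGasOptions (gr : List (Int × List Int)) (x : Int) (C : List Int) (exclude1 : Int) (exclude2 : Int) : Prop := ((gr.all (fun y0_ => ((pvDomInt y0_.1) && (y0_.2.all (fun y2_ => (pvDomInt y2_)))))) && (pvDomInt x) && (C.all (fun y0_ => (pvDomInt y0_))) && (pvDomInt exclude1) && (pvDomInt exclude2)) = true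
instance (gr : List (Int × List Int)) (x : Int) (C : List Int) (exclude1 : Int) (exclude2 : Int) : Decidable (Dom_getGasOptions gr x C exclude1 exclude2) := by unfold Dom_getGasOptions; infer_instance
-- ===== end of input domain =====

-- B replaces A's explicit-stack while-loop (mutable answer list) by a recursive DFS that
-- builds the result by list concatenation, visiting children in reversed order; alternative
-- decomposition, same visit count.  Both ports carry a fuel guard for totality in Lean.

-- ===== PORT A =====
-- fuel bound for the while-loop: a terminating Python run pops fewer than (E+2)^(E+2)
-- frames (every stack path uses distinct darts); purely a totality guard.
def pvAFuel (gr : List (Int × List Int)) : Nat :=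
  let e := gr.foldl (fun a q => a + q.2.length) 0 + 2
  e ^ e

def pvALoop (gr : List (Int × List Int)) (C : List Int) (e1 e2 : Int) :
    Nat → List (Int × Int × Int) → List (Int × Int) → List (Int × Int)
  | _, [], ans => ans
  | 0, _ :: _, ans => ans          -- fuel exhausted (unreachable under Pre_)
  | f + 1, (n, p, lev) :: rest, ans =>
    let v := (PySem.List.pyGet? C n).getD 0        -- C[n]; none (IndexError) excluded by Pre_
    let ans' := if v > 0 then ans ++ [(lev, v)] else ans
    let st' := (((PySem.Dict.mk gr).get? n).getD []).foldl   -- gr[n]; KeyError excluded by Pre_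
        (fun st c => if c = p ∨ c = e1 ∨ c = e2 then st else (c, n, lev + 1) :: st) rest
    pvALoop gr C e1 e2 f st' ans'

def getGasOptions (gr : List (Int × List Int)) (x : Int) (C : List Int) (exclude1 : Int) (exclude2 : Int) : List (Int × Int) :=
  pvALoop gr C exclude1 exclude2 (pvAFuel gr) [(x, -1, 0)] []

-- ===== PORT B =====
def pvBFuel (gr : List (Int × List Int)) : Nat :=
  let e := gr.foldl (fun a q => a + q.2.length) 0 + 2
  e ^ e

mutual
  -- dfs(n, p, lev); the remaining fuel is threaded through the recursion (totality guard only)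
  def pvBDfs (gr : List (Int × List Int)) (C : List Int) (e1 e2 : Int) :
      Nat → Int → Int → Int → List (Int × Int) × Nat
    | 0, _, _, _ => ([], 0)
    | f + 1, n, p, lev =>
      let v := (PySem.List.pyGet? C n).getD 0
      let here := if v > 0 then [(lev, v)] else []
      let r := pvBKids gr C e1 e2 f ((((PySem.Dict.mk gr).get? n).getD []).reverse) n p lev
      (here ++ r.1, r.2)
  termination_by f _ _ _ => (f, 0, 0)
  decreasing_by
    simp_wf
    exact Prod.Lex.left _ _ (Nat.lt_succ_self _)
  -- the comprehension over reversed(gr[n]): concatenate the kept children's results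
  def pvBKids (gr : List (Int × List Int)) (C : List Int) (e1 e2 : Int) :
      Nat → List Int → Int → Int → Int → List (Int × Int) × Nat
    | f, [], _, _, _ => ([], f)
    | f, c :: cs, n, p, lev =>
      if c = p ∨ c = e1 ∨ c = e2 then pvBKids gr C e1 e2 f cs n p lev
      else
        let r1 := pvBDfs gr C e1 e2 f c n (lev + 1)
        let r2 := pvBKids gr C e1 e2 (min r1.2 f) cs n p lev  -- min: fuel never grows (guard)
        (r1.1 ++ r2.1, r2.2)
  termination_by f cs _ _ _ => (f, 1, cs.length)
  decreasing_by
    all_goals simp_wf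
    · exact Prod.Lex.right _ (Prod.Lex.right _ (Nat.lt_succ_self _))
    · exact Prod.Lex.right _ (Prod.Lex.left _ _ (Nat.lt_succ_self _))
    · rcases Nat.lt_or_ge (min r1.2 f) f with h | h
      · exact Prod.Lex.left _ _ h
      · have hm : min r1.2 f = f := Nat.le_antisymm (Nat.min_le_right _ _) h
        rw [hm]; exact Prod.Lex.right _ (Prod.Lex.right _ (Nat.lt_succ_self _))
end

def getGasOptions_alt (gr : List (Int × List Int)) (x : Int) (C : List Int) (exclude1 : Int) (exclude2 : Int) : List (Int × Int) :=
  (pvBDfs gr C exclude1 exclude2 (pvBFuel gr) x (-1) 0).1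

-- ===== PRECONDITION & SPEC =====
-- Pre_ excludes exactly the inputs on which the Python A does not return normally: a visited
-- node that is not a key of gr (KeyError) or not a valid index into C (IndexError), or a
-- reachable non-backtracking cycle (the while-loop runs forever).  Stated graph-theoretically
-- over "darts" (node, parent) reachable from (x, -1).
def pvSuccs (gr : List (Int × List Int)) (e1 e2 : Int) (d : Int × Int) : List (Int × Int) :=
  (((PySem.Dict.mk gr).get? d.1).getD []).filterMap
    (fun c => if c = d.2 ∨ c = e1 ∨ c = e2 then none else some (c, d.1))

def pvSat (gr : List (Int × List Int)) (e1 e2 : Int) : Nat → List (Int × Int) → List (Int × Int)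
  | 0, R => R
  | k + 1, R => pvSat gr e1 e2 k ((R ++ R.flatMap (pvSuccs gr e1 e2)).dedup)

def pvPreCheck (gr : List (Int × List Int)) (x : Int) (C : List Int) (e1 e2 : Int) : Bool :=
  let bound := gr.foldl (fun a q => a + q.2.length) 0 + 2
  let R := pvSat gr e1 e2 bound [(x, -1)]
  (R.all fun d => ((PySem.Dict.mk gr).get? d.1).isSome && (PySem.List.pyGet? C d.1).isSome)
    && (R.all fun d => ! (pvSat gr e1 e2 bound (pvSuccs gr e1 e2 d)).contains d)

def Pre_getGasOptions (gr : List (Int × List Int)) (x : Int) (C : List Int) (exclude1 : Int) (exclude2 : Int) : Prop :=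
  pvPreCheck gr x C exclude1 exclude2 = true
instance (gr : List (Int × List Int)) (x : Int) (C : List Int) (exclude1 : Int) (exclude2 : Int) : Decidable (Pre_getGasOptions gr x C exclude1 exclude2) := by unfold Pre_getGasOptions; infer_instance

def pvWitness_getGasOptions : (List (Int × List Int)) × Int × List Int × Int × Int :=
  ([(0, [1]), (1, [0])], 0, [3, 5], -5, -6)

def Spec_getGasOptions (gr : List (Int × List Int)) (x : Int) (C : List Int) (exclude1 : Int) (exclude2 : Int) (out : List (Int × Int)) : Prop := out = getGasOptions_alt gr x C exclude1 exclude2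
instance (gr : List (Int × List Int)) (x : Int) (C : List Int) (exclude1 : Int) (exclude2 : Int) (out : List (Int × Int)) : Decidable (Spec_getGasOptions gr x C exclude1 exclude2 out) := by unfold Spec_getGasOptions; infer_instance

-- ===== CLAIM (what is proved, stated in full; the proofs are below) =====
def Claim_equal_getGasOptions : Prop := ∀ (gr : List (Int × List Int)) (x : Int) (C : List Int) (exclude1 : Int) (exclude2 : Int), Dom_getGasOptions gr x C exclude1 exclude2 → Pre_getGasOptions gr x C exclude1 exclude2 → Spec_getGasOptions gr x C exclude1 exclude2 (getGasOptions gr x C exclude1 exclude2)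

-- ===== LEMMAS AND PROOFS =====

theorem pvALoop_nil_fuel (gr : List (Int × List Int)) (C : List Int) (e1 e2 : Int)
    (f : Nat) (ans : List (Int × Int)) : pvALoop gr C e1 e2 f [] ans = ans := by
  cases f <;> rfl

theorem pvALoop_zero (gr : List (Int × List Int)) (C : List Int) (e1 e2 : Int)
    (st : List (Int × Int × Int)) (ans : List (Int × Int)) :
    pvALoop gr C e1 e2 0 st ans = ans := by
  cases st with
  | nil => rfl
  | cons h t => rfl

theorem pvBDfs_fuel_le (gr : List (Int × List Int)) (C : List Int) (e1 e2 : Int) :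
    ∀ f, (∀ n p lev, (pvBDfs gr C e1 e2 f n p lev).2 ≤ f) ∧
      (∀ cs n p lev, (pvBKids gr C e1 e2 f cs n p lev).2 ≤ f) := by
  intro f
  induction f using Nat.strong_induction_on with
  | _ f ih =>
    have hkids : ∀ cs f', f' ≤ f → ∀ n p lev, (pvBKids gr C e1 e2 f' cs n p lev).2 ≤ f' := by
      intro cs
      induction cs with
      | nil => intro f' _ n p lev; simp [pvBKids]
      | cons c cs ihc =>
        intro f' hf' n p lev
        by_cases hskip : c = p ∨ c = e1 ∨ c = e2
        · simpa [pvBKids, hskip] using ihc f' hf' n p lev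
        · have h2 : (pvBKids gr C e1 e2
              (min (pvBDfs gr C e1 e2 f' c n (lev + 1)).2 f') cs n p lev).2
              ≤ min (pvBDfs gr C e1 e2 f' c n (lev + 1)).2 f' :=
            ihc _ (le_trans (Nat.min_le_right _ _) hf') n p lev
          have := le_trans h2 (Nat.min_le_right _ _)
          simpa [pvBKids, hskip] using this
    constructor
    · intro n p lev
      cases f with
      | zero => simp [pvBDfs]
      | succ g =>
        have := hkids ((((PySem.Dict.mk gr).get? n).getD []).reverse) g (Nat.le_succ g) n p lev
        simp only [pvBDfs]
        exact le_trans this (Nat.le_succ g)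
    · intro cs n p lev; exact hkids cs f (le_refl f) n p lev

theorem pvFoldl_push (p e1 e2 n : Int) (lev : Int) :
    ∀ (l : List Int) (acc : List (Int × Int × Int)),
      l.foldl (fun st c => if c = p ∨ c = e1 ∨ c = e2 then st else (c, n, lev + 1) :: st) acc
        = ((l.reverse.filter (fun c => !(decide (c = p ∨ c = e1 ∨ c = e2)))).map
            (fun c => (c, n, lev + 1))) ++ acc := by
  intro l
  induction l with
  | nil => intro acc; simp
  | cons c cs ih =>
    intro acc
    rw [List.foldl_cons, List.reverse_cons, List.filter_append]
    by_cases hc : c = p ∨ c = e1 ∨ c = e2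
    · have hdt : decide (c = p ∨ c = e1 ∨ c = e2) = true := decide_eq_true hc
      rw [if_pos hc, ih]
      simp only [List.filter_cons, hdt, Bool.not_true, List.filter_nil, if_false,
        Bool.false_eq_true, List.append_nil]
    · have hdf : decide (c = p ∨ c = e1 ∨ c = e2) = false := decide_eq_false hc
      rw [if_neg hc, ih]
      simp only [List.filter_cons, hdf, Bool.not_false, List.filter_nil, if_true]
      simp [List.append_assoc]

-- the bridge: popping one frame from the stack produces exactly the recursive DFS of that
-- frame (with the residual fuel), then continues with the rest of the stack
theorem pvBridge (gr : List (Int × List Int)) (C : List Int) (e1 e2 : Int) :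
    ∀ f n p lev rest ans,
      pvALoop gr C e1 e2 f ((n, p, lev) :: rest) ans
        = pvALoop gr C e1 e2 (pvBDfs gr C e1 e2 f n p lev).2 rest
            (ans ++ (pvBDfs gr C e1 e2 f n p lev).1) := by
  intro f
  induction f using Nat.strong_induction_on with
  | _ f ih =>
    cases f with
    | zero =>
      intro n p lev rest ans
      simp [pvALoop_zero, pvBDfs, pvALoop_zero]
    | succ g =>
      -- stack version of the child loop = pvBKids, for every fuel ≤ g
      have hM : ∀ (ds : List Int) (f' : Nat), f' ≤ g → ∀ n p lev rest ans,
          pvALoop gr C e1 e2 f'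
              (((ds.filter (fun c => !(decide (c = p ∨ c = e1 ∨ c = e2)))).map
                (fun c => (c, n, lev + 1))) ++ rest) ans
            = pvALoop gr C e1 e2 (pvBKids gr C e1 e2 f' ds n p lev).2 rest
                (ans ++ (pvBKids gr C e1 e2 f' ds n p lev).1) := by
        intro ds
        induction ds with
        | nil => intro f' _ n p lev rest ans; simp [pvBKids]
        | cons c cs ihc =>
          intro f' hf' n p lev rest ans
          by_cases hskip : c = p ∨ c = e1 ∨ c = e2
          · have hdt : decide (c = p ∨ c = e1 ∨ c = e2) = true := decide_eq_true hskip
            have := ihc f' hf' n p lev rest ans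
            simp only [pvBKids, if_pos hskip]
            simpa only [List.filter_cons, hdt, Bool.not_true, Bool.false_eq_true, if_false]
              using this
          · have hd : pvALoop gr C e1 e2 f' ((c, n, lev + 1) :: ((cs.filter
                (fun c => !(decide (c = p ∨ c = e1 ∨ c = e2)))).map
                (fun c => (c, n, lev + 1)) ++ rest)) ans
                = pvALoop gr C e1 e2 (pvBDfs gr C e1 e2 f' c n (lev + 1)).2
                    ((cs.filter (fun c => !(decide (c = p ∨ c = e1 ∨ c = e2)))).map
                      (fun c => (c, n, lev + 1)) ++ rest)
                    (ans ++ (pvBDfs gr C e1 e2 f' c n (lev + 1)).1) :=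
              ih f' (Nat.lt_succ_of_le hf') c n (lev + 1) _ ans
            have hle : (pvBDfs gr C e1 e2 f' c n (lev + 1)).2 ≤ f' :=
              ((pvBDfs_fuel_le gr C e1 e2 f').1) c n (lev + 1)
            have hmin : min (pvBDfs gr C e1 e2 f' c n (lev + 1)).2 f'
                = (pvBDfs gr C e1 e2 f' c n (lev + 1)).2 := Nat.min_eq_left hle
            have ht := ihc (pvBDfs gr C e1 e2 f' c n (lev + 1)).2
              (le_trans hle hf') n p lev rest
              (ans ++ (pvBDfs gr C e1 e2 f' c n (lev + 1)).1)
            have hdf : decide (c = p ∨ c = e1 ∨ c = e2) = false := decide_eq_false hskip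
            simp only [pvBKids, if_neg hskip, hmin]
            simp only [List.filter_cons, hdf, Bool.not_false, if_true, List.map_cons,
              List.cons_append]
            rw [hd, ht]
            simp [List.append_assoc]
      intro n p lev rest ans
      show pvALoop gr C e1 e2 (g + 1) ((n, p, lev) :: rest) ans = _
      simp only [pvALoop]
      rw [pvFoldl_push]
      have := hM ((((PySem.Dict.mk gr).get? n).getD []).reverse) g (le_refl g) n p lev rest
        (if (PySem.List.pyGet? C n).getD 0 > 0 then ans ++ [(lev, (PySem.List.pyGet? C n).getD 0)] else ans)
      rw [this]
      simp only [pvBDfs]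
      by_cases hv : (PySem.List.pyGet? C n).getD 0 > 0
      · simp [hv, List.append_assoc]
      · simp [hv]

-- ===== VERDICT (by name: the statement is the Claim_ definition above) =====
theorem getGasOptions_spec : Claim_equal_getGasOptions := by
  intro gr x C exclude1 exclude2 _ _
  unfold Spec_getGasOptions getGasOptions getGasOptions_alt
  have hb : pvAFuel gr = pvBFuel gr := rfl
  rw [hb, pvBridge]
  simp [pvALoop_nil_fuel]
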